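-- pv_equiv track=rewrite | github.com/CSC-101/lab-5-Yuyang-labs | lab5.py | largest_between
-- ===== SOURCE A (Python) =====
-- def largest_between(list_num:list[int], lower_idx:int, upper_idx:int)-> int:
--
--     if upper_idx > len(list_num):
--         upper_idx = len(list_num) -1
--
--     elif lower_idx < 0:
--         lower_idx = 0
--
--     elif lower_idx >= upper_idx:
--         return None
--
--
--     largest_idx = None
--     largest_value = None
--     for num in range(lower_idx, upper_idx + 1):
--         current_value = list_num[num]
--         if largest_value is None or current_value > largest_value:
--             largest_value = current_value
--             largest_idx = num
--     return largest_idx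
-- ===== SOURCE B (Python) =====
-- def largest_between(list_num: list[int], lower_idx: int, upper_idx: int) -> int:
--
--     if upper_idx > len(list_num):
--         upper_idx = len(list_num) - 1
--
--     elif lower_idx < 0:
--         lower_idx = 0
--
--     elif lower_idx >= upper_idx:
--         return None
--
--     # two-pass decomposition: materialise the window's values, take the max,
--     # then locate its first occurrence
--     values = [list_num[i] for i in range(lower_idx, upper_idx + 1)]
--     if not values:
--         return None
--     best = max(values)
--     return lower_idx + values.index(best)
-- ===== Notes on version B (the rewrite author's own statement) =====
-- stated objective: alternative
-- what changed: Replaces A's single loop that tracks (largest_idx, largest_value) with a two-pass decomposition: build the window's value list, take max(), then return lower_idx plus the first index of that max.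
import Mathlib
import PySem

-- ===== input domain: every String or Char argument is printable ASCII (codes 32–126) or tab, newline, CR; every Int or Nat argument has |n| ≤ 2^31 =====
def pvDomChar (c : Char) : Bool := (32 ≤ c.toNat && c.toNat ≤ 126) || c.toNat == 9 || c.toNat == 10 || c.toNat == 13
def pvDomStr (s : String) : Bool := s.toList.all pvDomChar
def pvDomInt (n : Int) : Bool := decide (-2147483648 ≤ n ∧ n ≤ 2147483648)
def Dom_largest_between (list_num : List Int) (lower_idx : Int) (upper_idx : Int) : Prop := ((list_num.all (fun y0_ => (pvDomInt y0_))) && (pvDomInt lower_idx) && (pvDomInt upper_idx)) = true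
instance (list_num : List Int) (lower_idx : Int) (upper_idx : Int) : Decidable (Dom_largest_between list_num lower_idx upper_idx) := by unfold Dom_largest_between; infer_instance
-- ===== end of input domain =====

-- B replaces A's single max-tracking loop by a two-pass decomposition (collect the
-- window's values, take the max, then locate its first occurrence).

-- ===== PORT A =====
-- the loop body of A: one iteration over index `num`
def stepA (list_num : List Int) (st : Option Int × Option Int) (num : Int) : Option Int × Option Int :=
  match PySem.List.pyGet? list_num num with
  | none => st   -- IndexError in Python; excluded by Pre_largest_between
  | some current_value =>
    match st.2 with
    | none => (some num, some current_value)
    | some largest_value =>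
      if current_value > largest_value then (some num, some current_value) else st

-- A's `for num in range(lo, hi + 1)` loop, state = (largest_idx, largest_value)
def loopA (list_num : List Int) (lo hi : Int) : Option Int × Option Int :=
  (PySem.List.pyRange lo (hi + 1) 1).foldl (stepA list_num) (none, none)

def largest_between (list_num : List Int) (lower_idx : Int) (upper_idx : Int) : Option Int :=
  if upper_idx > (list_num.length : Int) then
    (loopA list_num lower_idx ((list_num.length : Int) - 1)).1
  else if lower_idx < 0 then
    (loopA list_num 0 upper_idx).1
  else if lower_idx ≥ upper_idx then none
  else (loopA list_num lower_idx upper_idx).1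

-- ===== PORT B =====
-- values = [list_num[i] for i in range(lo, hi + 1)]  (an out-of-range list_num[i]
-- raises IndexError in Python; here the element is skipped — excluded by Pre_)
def valsB (list_num : List Int) (lo hi : Int) : List Int :=
  (PySem.List.pyRange lo (hi + 1) 1).filterMap (PySem.List.pyGet? list_num)

-- the code after B's guard chain, with the (possibly reassigned) bounds lo/hi
def tailB (list_num : List Int) (lo hi : Int) : Option Int :=
  let values := valsB list_num lo hi
  if values = [] then none
  else
    match PySem.List.max? values (fun y => y) with
    | none => none
    | some best => (PySem.List.index? values best).map (fun k => lo + (k : Int))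

def largest_between_alt (list_num : List Int) (lower_idx : Int) (upper_idx : Int) : Option Int :=
  if upper_idx > (list_num.length : Int) then
    tailB list_num lower_idx ((list_num.length : Int) - 1)
  else if lower_idx < 0 then
    tailB list_num 0 upper_idx
  else if lower_idx ≥ upper_idx then none
  else tailB list_num lower_idx upper_idx

-- ===== PRECONDITION & SPEC =====
-- Pre_ excludes exactly the inputs on which A (and B alike) raises IndexError:
-- upper_idx = len(list_num) with lower_idx < len (the loop reads list_num[len]),
-- and upper_idx > len with lower_idx < -len (a read below -len).
def Pre_largest_between (list_num : List Int) (lower_idx : Int) (upper_idx : Int) : Prop :=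
  (upper_idx > (list_num.length : Int) → -(list_num.length : Int) ≤ lower_idx) ∧
  (upper_idx = (list_num.length : Int) → (list_num.length : Int) ≤ lower_idx)
instance (list_num : List Int) (lower_idx : Int) (upper_idx : Int) : Decidable (Pre_largest_between list_num lower_idx upper_idx) := by unfold Pre_largest_between; infer_instance
def pvWitness_largest_between : List Int × Int × Int := ([3, 1, 2], 0, 2)

def Spec_largest_between (list_num : List Int) (lower_idx : Int) (upper_idx : Int) (out : Option Int) : Prop := out = largest_between_alt list_num lower_idx upper_idx
instance (list_num : List Int) (lower_idx : Int) (upper_idx : Int) (out : Option Int) : Decidable (Spec_largest_between list_num lower_idx upper_idx out) := by unfold Spec_largest_between; infer_instance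

-- ===== CLAIM =====
def Claim_equal_largest_between : Prop := ∀ (list_num : List Int) (lower_idx : Int) (upper_idx : Int), Dom_largest_between list_num lower_idx upper_idx → Pre_largest_between list_num lower_idx upper_idx → Spec_largest_between list_num lower_idx upper_idx (largest_between list_num lower_idx upper_idx)

-- ===== LEMMAS AND PROOFS =====

-- first-max of a list: (position of the first maximal element, the maximum value)
def fm : List Int → Option (Nat × Int)
  | [] => none
  | x :: xs =>
    match fm xs with
    | none => some (0, x)
    | some (j, v) => if v > x then some (j + 1, v) else some (0, x)

theorem fm_isSome (x : Int) (xs : List Int) : ∃ j v, fm (x :: xs) = some (j, v) := by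
  unfold fm
  rcases h : fm xs with _ | ⟨j, v⟩
  · exact ⟨0, x, rfl⟩
  · by_cases hv : v > x
    · exact ⟨j + 1, v, by simp [hv]⟩
    · exact ⟨0, x, by simp [hv]⟩

theorem fm_none (l : List Int) (h : fm l = none) : l = [] := by
  cases l with
  | nil => rfl
  | cons x xs =>
    obtain ⟨j, v, hjv⟩ := fm_isSome x xs
    rw [hjv] at h; cases h

theorem foldl_max_max (l : List Int) : ∀ a b : Int, l.foldl max (max a b) = max a (l.foldl max b) := by
  induction l with
  | nil => intro a b; simp
  | cons c t ih =>
    intro a b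
    simp only [List.foldl_cons]
    rw [max_assoc, ih]

theorem fm_max (t : List Int) : ∀ (x : Int) (j : Nat) (v : Int), fm (x :: t) = some (j, v) → v = t.foldl max x := by
  induction t with
  | nil => intro x j v h; simp [fm] at h; simp [h.2]
  | cons y t' ih =>
    intro x j v h
    obtain ⟨j', v', hfm⟩ := fm_isSome y t'
    have hv' : v' = t'.foldl max y := ih y j' v' hfm
    unfold fm at h
    rw [hfm] at h
    rw [List.foldl_cons, foldl_max_max t' x y, ← hv']
    by_cases hc : v' > x
    · simp [hc] at h
      omega
    · simp [hc] at h
      omega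

theorem fm_index (l : List Int) : ∀ (j : Nat) (v : Int), fm l = some (j, v) → PySem.List.index? l v = some j := by
  induction l with
  | nil => intro j v h; simp [fm] at h
  | cons x t ih =>
    intro j v h
    unfold fm at h
    rcases hfm : fm t with _ | ⟨j', v'⟩
    · rw [hfm] at h
      simp at h
      rw [← h.2, ← h.1]
      exact PySem.List.index?_cons_self x t
    · rw [hfm] at h
      by_cases hc : v' > x
      · simp [hc] at h
        have hne : x ≠ v := by omega
        rw [PySem.List.index?_cons_of_ne t hne]
        have := ih j' v' hfm
        rw [h.2] at this
        rw [this]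
        simp [← h.1]
      · simp [hc] at h
        rw [← h.2, ← h.1]
        exact PySem.List.index?_cons_self x t

theorem get_isSome (xs : List Int) (i : Int) (h1 : -(xs.length : Int) ≤ i) (h2 : i < (xs.length : Int)) :
    ∃ v, PySem.List.pyGet? xs i = some v := by
  rcases h : PySem.List.pyGet? xs i with _ | v
  · rw [PySem.List.pyGet?_eq_none_iff] at h
    exact absurd ⟨h1, h2⟩ h
  · exact ⟨v, rfl⟩

-- decompose the comprehension's value list at the head of the range
theorem vals_cons (xs : List Int) (p q c : Int) (hpq : p < q)
    (hget : PySem.List.pyGet? xs p = some c) :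
    (PySem.List.pyRange p q).filterMap (PySem.List.pyGet? xs)
      = c :: (PySem.List.pyRange (p + 1) q).filterMap (PySem.List.pyGet? xs) := by
  rw [PySem.List.pyRange_one_cons hpq, List.filterMap_cons, hget]

theorem loop_gen (xs : List Int) (q : Int) :
    ∀ (m : Nat) (p i0 v0 : Int), (q - p).toNat = m →
    (∀ i, p ≤ i → i < q → ∃ v, PySem.List.pyGet? xs i = some v) →
    (PySem.List.pyRange p q).foldl (stepA xs) (some i0, some v0)
      = match fm ((PySem.List.pyRange p q).filterMap (PySem.List.pyGet? xs)) with
        | none => (some i0, some v0)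
        | some (j, v) => if v > v0 then (some (p + (j : Int)), some v) else (some i0, some v0) := by
  intro m
  induction m with
  | zero =>
    intro p i0 v0 hm _
    rw [PySem.List.pyRange_one]
    have h1 : (q - p).toNat = 0 := hm
    simp [h1, fm]
  | succ k ih =>
    intro p i0 v0 hm H
    have hpq : p < q := by omega
    obtain ⟨c, hget⟩ := H p le_rfl hpq
    rw [PySem.List.pyRange_one_cons hpq, List.foldl_cons]
    have hstep : stepA xs (some i0, some v0) p
        = if c > v0 then (some p, some c) else (some i0, some v0) := by
      simp [stepA, hget]
    rw [hstep, ← PySem.List.pyRange_one_cons hpq, vals_cons xs p q c hpq hget]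
    have H' : ∀ i, p + 1 ≤ i → i < q → ∃ v, PySem.List.pyGet? xs i = some v :=
      fun i h1 h2 => H i (by omega) h2
    have ih' := fun i0' v0' => ih (p + 1) i0' v0' (by omega) H'
    rcases hfm : fm ((PySem.List.pyRange (p + 1) q).filterMap (PySem.List.pyGet? xs)) with _ | ⟨j, v⟩
    · have hnil := fm_none _ hfm
      by_cases hxv : c > v0
      · rw [if_pos hxv, ih' p c, hfm]
        simp [fm, hnil, hxv]
      · rw [if_neg hxv, ih' i0 v0, hfm]
        simp [fm, hnil, hxv]
    · by_cases hxv : c > v0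
      · rw [if_pos hxv, ih' p c, hfm]
        by_cases hvx : v > c
        · simp only [fm, hfm, if_pos hvx]
          have : p + 1 + (j : Int) = p + ((j : Nat) + 1 : Nat) := by push_cast; ring
          have hvv : v > v0 := by omega
          simp only [this]
          simp [hvv]
        · simp only [fm, hfm, if_neg hvx]
          simp [hxv]
      · rw [if_neg hxv, ih' i0 v0, hfm]
        by_cases hvx : v > c
        · simp only [fm, hfm, if_pos hvx]
          by_cases hvv : v > v0
          · have : p + 1 + (j : Int) = p + ((j : Nat) + 1 : Nat) := by push_cast; ring
            simp [hvv, this]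
          · simp [hvv]
        · simp only [fm, hfm, if_neg hvx]
          have hvv : ¬ v > v0 := by omega
          simp [hvv, hxv]

theorem loopA_eq (xs : List Int) (lo hi : Int) (hlh : lo ≤ hi)
    (H : ∀ i, lo ≤ i → i < hi + 1 → ∃ v, PySem.List.pyGet? xs i = some v) :
    (loopA xs lo hi).1 = (fm (valsB xs lo hi)).map (fun jv => lo + (jv.1 : Int)) := by
  unfold loopA valsB
  obtain ⟨c, hget⟩ := H lo le_rfl (by omega)
  rw [PySem.List.pyRange_one_cons (show lo < hi + 1 by omega), List.foldl_cons]
  have hstep : stepA xs (none, none) lo = (some lo, some c) := by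
    simp [stepA, hget]
  rw [hstep]
  simp only [List.filterMap_cons, hget]
  rw [loop_gen xs (hi + 1) ((hi + 1 - (lo + 1)).toNat) (lo + 1) lo c rfl
      (fun i h1 h2 => H i (by omega) h2)]
  rcases hfm : fm ((PySem.List.pyRange (lo + 1) (hi + 1)).filterMap (PySem.List.pyGet? xs)) with _ | ⟨j, v⟩
  · simp [fm, fm_none _ hfm]
  · by_cases hvx : v > c
    · simp only [fm, hfm, if_pos hvx]
      have : lo + 1 + (j : Int) = lo + ((j : Nat) + 1 : Nat) := by push_cast; ring
      simp [this]
    · simp only [fm, hfm, if_neg hvx]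
      simp

theorem mainEq (xs : List Int) (lo hi : Int) (hlh : lo ≤ hi)
    (H : ∀ i, lo ≤ i → i < hi + 1 → ∃ v, PySem.List.pyGet? xs i = some v) :
    (loopA xs lo hi).1 = tailB xs lo hi := by
  rw [loopA_eq xs lo hi hlh H]
  unfold tailB
  obtain ⟨c, hget⟩ := H lo le_rfl (by omega)
  have hvals : valsB xs lo hi
      = c :: (PySem.List.pyRange (lo + 1) (hi + 1)).filterMap (PySem.List.pyGet? xs) := by
    unfold valsB
    exact vals_cons xs lo (hi + 1) c (by omega) hget
  rw [hvals]
  obtain ⟨J, V, hfm⟩ := fm_isSome c ((PySem.List.pyRange (lo + 1) (hi + 1)).filterMap (PySem.List.pyGet? xs))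
  rw [hfm]
  simp only [PySem.List.max?_id_cons]
  rw [← fm_max _ _ _ _ hfm]
  have hidx := fm_index _ _ _ hfm
  rw [PySem.List.index?_eq_idxOf?] at hidx
  simp [hidx]

theorem loopA_empty (xs : List Int) (lo hi : Int) (h : hi < lo) : (loopA xs lo hi).1 = none := by
  unfold loopA
  rw [PySem.List.pyRange_one]
  have : (hi + 1 - lo).toNat = 0 := by omega
  simp [this]

theorem tailB_empty (xs : List Int) (lo hi : Int) (h : hi < lo) : tailB xs lo hi = none := by
  unfold tailB valsB
  rw [PySem.List.pyRange_one]
  have : (hi + 1 - lo).toNat = 0 := by omega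
  simp [this]

-- ===== VERDICT =====
theorem largest_between_spec : Claim_equal_largest_between := by
  intro xs lo up hdom hpre
  obtain ⟨hpre1, hpre2⟩ := hpre
  unfold Spec_largest_between largest_between largest_between_alt
  by_cases h1 : up > (xs.length : Int)
  · rw [if_pos h1, if_pos h1]
    have hlo : -(xs.length : Int) ≤ lo := hpre1 h1
    by_cases h2 : lo ≤ (xs.length : Int) - 1
    · exact mainEq xs lo ((xs.length : Int) - 1) h2
        (fun i hi1 hi2 => get_isSome xs i (by omega) (by omega))
    · rw [loopA_empty xs lo _ (by omega), tailB_empty xs lo _ (by omega)]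
  · rw [if_neg h1, if_neg h1]
    by_cases h2 : lo < 0
    · rw [if_pos h2, if_pos h2]
      have hupn : up ≠ (xs.length : Int) := by
        intro he
        have := hpre2 he
        omega
      by_cases h3 : 0 ≤ up
      · exact mainEq xs 0 up h3
          (fun i hi1 hi2 => get_isSome xs i (by omega) (by omega))
      · rw [loopA_empty xs 0 up (by omega), tailB_empty xs 0 up (by omega)]
    · rw [if_neg h2, if_neg h2]
      by_cases h3 : lo ≥ up
      · rw [if_pos h3, if_pos h3]
      · rw [if_neg h3, if_neg h3]
        have hupn : up ≠ (xs.length : Int) := by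
          intro he
          have := hpre2 he
          omega
        exact mainEq xs lo up (by omega)
          (fun i hi1 hi2 => get_isSome xs i (by omega) (by omega))
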